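-- pv_equiv track=rewrite | github.com/NVIDIA/NeMo | nemo/collections/asr/data/audio_to_label.py | getRepeatedList
-- ===== SOURCE A (Python) =====
-- from collections import Counter, OrderedDict
--
-- def getRepeatedList(mapping_argmat, score_mat_size):
--     """
--     Count the numbers in the mapping dictionary and create lists that contain
--     repeated indices to be used for creating the repeated affinity matrix for
--     fusing the affinity values.
--     """
--     count_dict = dict(Counter(mapping_argmat))
--     repeat_list = []
--     for k in range(score_mat_size):
--         if k in count_dict:
--             repeat_list.append(count_dict[k])
--         else:
--             repeat_list.append(0)
--     return repeat_list
-- ===== SOURCE B (Python) =====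
-- def getRepeatedList(mapping_argmat, score_mat_size):
--     """Sort the in-range values once, then emit per-index run lengths with a
--     merge-style pointer walking the sorted list in step with range(score_mat_size)."""
--     vals = sorted(x for x in mapping_argmat if 0 <= x < score_mat_size)
--     repeat_list = []
--     i = 0
--     n = len(vals)
--     for k in range(score_mat_size):
--         j = i
--         while j < n and vals[j] == k:
--             j += 1
--         repeat_list.append(j - i)
--         i = j
--     return repeat_list
-- ===== Notes on version B (the rewrite author's own statement) =====
-- stated objective: alternative
-- what changed: Replaces the Counter hash-map histogram with a sort-then-merge scan: the in-range values are sorted once and a single pointer walks the sorted list in step with range(score_mat_size), emitting the length of each run of equal values; no dictionary is built or queried.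
import Mathlib
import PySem

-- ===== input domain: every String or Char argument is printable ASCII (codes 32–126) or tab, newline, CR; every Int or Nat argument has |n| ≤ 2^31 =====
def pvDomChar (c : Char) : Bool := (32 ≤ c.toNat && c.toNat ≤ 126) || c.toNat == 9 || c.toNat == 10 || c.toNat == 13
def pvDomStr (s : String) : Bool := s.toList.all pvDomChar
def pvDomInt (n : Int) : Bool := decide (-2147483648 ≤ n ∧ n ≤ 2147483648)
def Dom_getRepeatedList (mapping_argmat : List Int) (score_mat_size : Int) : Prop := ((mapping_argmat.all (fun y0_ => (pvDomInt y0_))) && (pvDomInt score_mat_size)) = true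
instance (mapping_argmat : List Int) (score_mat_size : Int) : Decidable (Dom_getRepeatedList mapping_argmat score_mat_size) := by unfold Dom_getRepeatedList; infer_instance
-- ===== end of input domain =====

-- B replaces the Counter hash-map histogram by sorting the in-range values once
-- and emitting per-index run lengths with a merge-style pointer (alternative algorithm).


-- ===== PORT A =====
def getRepeatedList (mapping_argmat : List Int) (score_mat_size : Int) : List Int :=
  let count_dict := PySem.Dict.counter mapping_argmat
  (PySem.List.pyRange 0 score_mat_size 1).foldl
    (fun repeat_list k =>
      if count_dict.contains k then repeat_list ++ [count_dict.getD k 0]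
      else repeat_list ++ [(0 : Int)]) []

-- ===== PORT B =====
-- the inner 'while j < n and vals[j] == k' advance of the pointer, transcribed as
-- structural recursion on the not-yet-consumed suffix of vals (pointer i ↔ suffix);
-- returns (j - i, remaining suffix)
def runSplit (k : Int) : List Int → Int × List Int
  | [] => (0, [])
  | x :: xs =>
    if x = k then
      let r := runSplit k xs
      (r.1 + 1, r.2)
    else (0, x :: xs)

def getRepeatedList_alt (mapping_argmat : List Int) (score_mat_size : Int) : List Int :=
  let vals := PySem.List.sorted
    (mapping_argmat.filter (fun x => decide (0 ≤ x ∧ x < score_mat_size))) (fun x => x) false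
  ((PySem.List.pyRange 0 score_mat_size 1).foldl
      (fun s k =>
        let r := runSplit k s.2
        (s.1 ++ [r.1], r.2))
      ([], vals)).1

-- ===== PRECONDITION & SPEC =====
def Spec_getRepeatedList (mapping_argmat : List Int) (score_mat_size : Int) (out : List Int) : Prop := out = getRepeatedList_alt mapping_argmat score_mat_size
instance (mapping_argmat : List Int) (score_mat_size : Int) (out : List Int) : Decidable (Spec_getRepeatedList mapping_argmat score_mat_size out) := by unfold Spec_getRepeatedList; infer_instance

-- ===== CLAIM =====
def Claim_equal_getRepeatedList : Prop := ∀ (mapping_argmat : List Int) (score_mat_size : Int), Dom_getRepeatedList mapping_argmat score_mat_size → Spec_getRepeatedList mapping_argmat score_mat_size (getRepeatedList mapping_argmat score_mat_size)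

-- ===== LEMMAS AND PROOFS =====

-- A's result is the list of counts over range(score_mat_size).
theorem portA_eq_map (m : List Int) (n : Int) :
    getRepeatedList m n = (PySem.List.pyRange 0 n 1).map (fun k => (m.count k : Int)) := by
  unfold getRepeatedList
  have h : ∀ (init : List Int),
      (PySem.List.pyRange 0 n 1).foldl
        (fun repeat_list k =>
          if (PySem.Dict.counter m).contains k then repeat_list ++ [(PySem.Dict.counter m).getD k 0]
          else repeat_list ++ [(0 : Int)]) init
      = init ++ (PySem.List.pyRange 0 n 1).map (fun k => (m.count k : Int)) := by
    intro init
    induction (PySem.List.pyRange 0 n 1) generalizing init with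
    | nil => simp
    | cons k ks ih =>
      simp only [List.foldl_cons, List.map_cons, ih]
      by_cases hk : (PySem.Dict.counter m).contains k
      · simp [hk, PySem.Dict.getD_counter]
      · have : m.count k = 0 := by
          rw [List.count_eq_zero]
          intro hmem
          exact hk (by simpa [PySem.Dict.contains_counter] using hmem)
        simp [hk, this]
  simpa using h []

-- On a sorted suffix whose elements are all ≥ k, the run of k's is exactly
-- all occurrences of k, and the remainder is the elements > k.
theorem runSplit_eq (k : Int) (l : List Int) (hs : l.Pairwise (· ≤ ·))
    (hge : ∀ x ∈ l, k ≤ x) :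
    runSplit k l = ((l.count k : Int), l.filter (fun x => decide (k < x))) := by
  induction l with
  | nil => simp [runSplit]
  | cons x xs ih =>
    rw [List.pairwise_cons] at hs
    by_cases hx : x = k
    · subst hx
      have := ih hs.2 (fun y hy => hge y (List.mem_cons_of_mem _ hy))
      simp [runSplit, this]
    · have hk : k < x := lt_of_le_of_ne (hge x (List.mem_cons_self)) (Ne.symm hx)
      have hcnt : (x :: xs).count k = 0 := by
        rw [List.count_eq_zero]
        intro hmem
        rcases List.mem_cons.mp hmem with h | h
        · exact hx h.symm
        · exact absurd (lt_of_lt_of_le hk (hs.1 k h)) (lt_irrefl k)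
      have hfil : (x :: xs).filter (fun y => decide (k < y)) = x :: xs := by
        rw [List.filter_eq_self]
        intro y hy
        rcases List.mem_cons.mp hy with h | h
        · subst h; simpa using hk
        · simpa using lt_of_lt_of_le hk (hs.1 y h)
      simp [runSplit, hx, hcnt, hfil]

-- Loop invariant for B's merge scan over consecutive keys a, a+1, …, a+t-1.
theorem loop_inv (t : Nat) : ∀ (a : Int) (rest out : List Int),
    rest.Pairwise (· ≤ ·) → (∀ x ∈ rest, a ≤ x) →
    ((PySem.List.pyRange a (a + t) 1).foldl
        (fun s k =>
          let r := runSplit k s.2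
          (s.1 ++ [r.1], r.2))
        (out, rest)).1
      = out ++ (PySem.List.pyRange a (a + t) 1).map (fun k => (rest.count k : Int)) := by
  induction t with
  | zero =>
    intro a rest out _ _
    simp [PySem.List.pyRange_one_eq_nil (le_refl a)]
  | succ t ih =>
    intro a rest out hs hge
    have hab : a < a + (t + 1 : Nat) := by push_cast; omega
    rw [PySem.List.pyRange_one_cons hab]
    simp only [List.foldl_cons, List.map_cons]
    rw [runSplit_eq a rest hs hge]
    have hend : a + ((t + 1 : Nat) : Int) = (a + 1) + (t : Nat) := by push_cast; omega
    rw [hend]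
    rw [ih (a + 1) (rest.filter (fun x => decide (a < x))) (out ++ [(rest.count a : Int)])
        (hs.filter _) (by intro x hx; have := List.of_mem_filter hx; simp at this; omega)]
    have hmap : (PySem.List.pyRange (a + 1) ((a + 1) + (t : Nat)) 1).map
        (fun k => ((rest.filter (fun x => decide (a < x))).count k : Int))
        = (PySem.List.pyRange (a + 1) ((a + 1) + (t : Nat)) 1).map
        (fun k => (rest.count k : Int)) := by
      apply List.map_congr_left
      intro k hk
      have hk' : a + 1 ≤ k := (PySem.List.mem_pyRange_one.mp hk).1
      congr 1
      rw [List.count_filter]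
      simp; omega
    rw [hmap, List.append_assoc]
    rfl

theorem portB_eq_map (m : List Int) (n : Int) :
    getRepeatedList_alt m n = (PySem.List.pyRange 0 n 1).map (fun k => (m.count k : Int)) := by
  unfold getRepeatedList_alt
  by_cases hn : n ≤ 0
  · simp [PySem.List.pyRange_one_eq_nil hn]
  · have hn' : (0 : Int) + (n.toNat : Nat) = n := by omega
    set vals := PySem.List.sorted
      (m.filter (fun x => decide (0 ≤ x ∧ x < n))) (fun x => x) false with hvals
    have hinv := loop_inv n.toNat 0 vals []
      (PySem.List.sorted_pairwise (m.filter (fun x => decide (0 ≤ x ∧ x < n))) (fun x => x))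
      (by intro x hx
          have : x ∈ m.filter (fun x => decide (0 ≤ x ∧ x < n)) :=
            (PySem.List.mem_sorted _ _ _ _).mp hx
          have h2 := List.of_mem_filter this
          simp at h2; omega)
    rw [hn'] at hinv
    rw [hinv]
    simp only [List.nil_append]
    apply List.map_congr_left
    intro k hk
    obtain ⟨hk0, hkn⟩ := PySem.List.mem_pyRange_one.mp hk
    congr 1
    rw [List.Perm.count_eq (PySem.List.sorted_perm _ _ _)]
    rw [List.count_filter]
    simp; omega

-- ===== VERDICT =====
theorem getRepeatedList_spec : Claim_equal_getRepeatedList := by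
  intro m n _
  unfold Spec_getRepeatedList
  rw [portA_eq_map, portB_eq_map]
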